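-- pv_equiv track=rewrite | github.com/gokulgk-9402/Daily-CP-August-2022 | FactDigitSum.py | FactDigit
-- ===== SOURCE A (Python) =====
-- def FactDigit(N):
--
--     factorials = [1]
--     for i in range(1, 10):
--         factorials.append(factorials[-1] * i)
--
--     def helper(number):
--         if number == 0:
--             return []
--
--         for i in range(9, -1, -1):
--             if factorials[i] <= number:
--                 quo = number//factorials[i]
--                 rem = number % factorials[i]
--                 return helper(rem) + ([i] * quo)
--
--     ans = helper(N)
--     # ans.sort()
--     ans = [str(x) for x in ans]
--
--     for i in range(1, len(ans)):
--         if ans[i] == '1':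
--             ans[i] = '0'
--
--     return "".join(ans)
-- ===== SOURCE B (Python) =====
-- def FactDigit(N):
--     facts = [1]
--     for i in range(1, 10):
--         facts.append(facts[-1] * i)
--
--     # single greedy descending pass instead of A's recursion
--     blocks = []
--     n = N
--     for i in range(9, -1, -1):
--         if facts[i] <= n:
--             q, n = divmod(n, facts[i])
--             blocks.append([i] * q)
--
--     digits = []
--     for b in reversed(blocks):
--         digits.extend(b)
--
--     return "".join("0" if k > 0 and d == 1 else str(d)
--                    for k, d in enumerate(digits))
-- ===== Notes on version B (the rewrite author's own statement) =====
-- stated objective: simpler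
-- what changed: A's recursive helper (which re-scans the factorial table on every call and builds the digit list by recursive prepending) is replaced by one non-recursive greedy descending pass over the indices 9..0 collecting digit blocks, concatenated in reverse; the index-loop that patches '1'->'0' in place is replaced by a single enumerate-based join.
import Mathlib
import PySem

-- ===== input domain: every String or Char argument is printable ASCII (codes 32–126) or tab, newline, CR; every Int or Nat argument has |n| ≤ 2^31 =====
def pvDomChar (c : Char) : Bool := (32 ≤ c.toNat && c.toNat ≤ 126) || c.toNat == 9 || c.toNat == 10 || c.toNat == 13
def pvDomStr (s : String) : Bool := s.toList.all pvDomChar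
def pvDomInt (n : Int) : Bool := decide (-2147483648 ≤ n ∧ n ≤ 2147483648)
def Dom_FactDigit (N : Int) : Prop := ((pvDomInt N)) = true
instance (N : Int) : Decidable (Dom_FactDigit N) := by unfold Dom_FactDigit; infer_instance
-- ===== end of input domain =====

-- B replaces A's recursive helper by a single greedy descending pass collecting blocks
-- (objective: simpler); return values agree on N ≥ 0, where A returns at all.

-- ===== PORT A =====
def pvFactsA : List Int :=
  (PySem.List.pyRange 1 10 1).foldl
    (fun acc i => acc ++ [PySem.List.pyGetD acc (-1) 0 * i]) [1]

-- fuel bounds only the recursion depth: the chosen factorial index strictly decreases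
-- call over call, so the depth is ≤ 11 on every input; fuel = 11 is never exhausted.
def pvHelperA : Nat → Int → Option (List Int)
  | 0, _ => none
  | fuel+1, number =>
    if number = 0 then some []
    else
      match (PySem.List.pyRange 9 (-1) (-1)).find?
          (fun i => decide (PySem.List.pyGetD pvFactsA i 0 ≤ number)) with
      | none => none   -- Python falls through and returns None (only for number < 0)
      | some i =>
        match pvHelperA fuel (PySem.Int.mod number (PySem.List.pyGetD pvFactsA i 0)) with
        | none => none
        | some l =>
            some (l ++ List.replicate
              (PySem.Int.floordiv number (PySem.List.pyGetD pvFactsA i 0)).toNat i)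

def pvSwapStepA (a : List String) (i : Int) : List String :=
  if PySem.List.pyGetD a i "" = "1" then PySem.List.pySetD a i "0" else a

-- for N < 0 Python's `helper` returns None and the comprehension raises TypeError;
-- `.getD []` is the total stand-in there, excluded by Pre_FactDigit.
def FactDigit (N : Int) : String :=
  let ans := ((pvHelperA 11 N).getD []).map (fun x => PySem.Int.toStr x)
  PySem.Str.join "" ((PySem.List.pyRange 1 (ans.length : Int) 1).foldl pvSwapStepA ans)

-- ===== PORT B =====
def pvFactsB : List Int :=
  (PySem.List.pyRange 1 10 1).foldl
    (fun acc i => acc ++ [PySem.List.pyGetD acc (-1) 0 * i]) [1]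

def pvStepB (st : List (List Int) × Int) (i : Int) : List (List Int) × Int :=
  if PySem.List.pyGetD pvFactsB i 0 ≤ st.2 then
    (st.1 ++ [List.replicate (PySem.Int.floordiv st.2 (PySem.List.pyGetD pvFactsB i 0)).toNat i],
     PySem.Int.mod st.2 (PySem.List.pyGetD pvFactsB i 0))
  else st

def FactDigit_alt (N : Int) : String :=
  let blocks := ((PySem.List.pyRange 9 (-1) (-1)).foldl pvStepB ([], N)).1
  let digits := blocks.reverse.foldl (fun acc b => acc ++ b) []
  PySem.Str.join "" ((PySem.List.enumerate digits 0).map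
    (fun kd => if 0 < kd.1 ∧ kd.2 = 1 then "0" else PySem.Int.toStr kd.2))

-- ===== PRECONDITION & SPEC =====
-- Pre_ excludes N < 0, on which A's helper returns None and the list comprehension
-- raises TypeError ('NoneType' object is not iterable); B returns "" there.
def Pre_FactDigit (N : Int) : Prop := 0 ≤ N
instance (N : Int) : Decidable (Pre_FactDigit N) := by unfold Pre_FactDigit; infer_instance
def pvWitness_FactDigit : Int := (23)

def Spec_FactDigit (N : Int) (out : String) : Prop := out = FactDigit_alt N
instance (N : Int) (out : String) : Decidable (Spec_FactDigit N out) := by unfold Spec_FactDigit; infer_instance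

-- ===== CLAIM (what is proved, stated in full; the proofs are below) =====
def Claim_equal_FactDigit : Prop := ∀ (N : Int), Dom_FactDigit N → Pre_FactDigit N → Spec_FactDigit N (FactDigit N)

-- ===== LEMMAS AND PROOFS =====

lemma pvFoldB_acc (L : List Int) : ∀ (bs : List (List Int)) (n : Int),
    L.foldl pvStepB (bs, n)
      = (bs ++ (L.foldl pvStepB ([], n)).1, (L.foldl pvStepB ([], n)).2) := by
  induction L with
  | nil => intro bs n; simp
  | cons i L ih =>
    intro bs n
    simp only [List.foldl_cons]
    by_cases h : PySem.List.pyGetD pvFactsB i 0 ≤ n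
    · have e1 : pvStepB (bs, n) i
          = (bs ++ [List.replicate (PySem.Int.floordiv n (PySem.List.pyGetD pvFactsB i 0)).toNat i],
             PySem.Int.mod n (PySem.List.pyGetD pvFactsB i 0)) := by
        simp [pvStepB, h]
      have e2 : pvStepB ([], n) i
          = ([List.replicate (PySem.Int.floordiv n (PySem.List.pyGetD pvFactsB i 0)).toNat i],
             PySem.Int.mod n (PySem.List.pyGetD pvFactsB i 0)) := by
        simp [pvStepB, h]
      rw [e1, e2, ih, ih [List.replicate (PySem.Int.floordiv n (PySem.List.pyGetD pvFactsB i 0)).toNat i]]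
      simp
    · have e1 : pvStepB (bs, n) i = (bs, n) := by simp [pvStepB, h]
      have e2 : pvStepB ([], n) i = ([], n) := by simp [pvStepB, h]
      rw [e1, e2, ih]

lemma pvFoldB_bound (L : List Int) (hL : ∀ i ∈ L, 0 ≤ i ∧ i ≤ 9) :
    ∀ (bs : List (List Int)) (n : Int), (∀ b ∈ bs, ∀ d ∈ b, 0 ≤ d ∧ d ≤ 9) →
    ∀ b ∈ (L.foldl pvStepB (bs, n)).1, ∀ d ∈ b, 0 ≤ d ∧ d ≤ 9 := by
  induction L with
  | nil => intro bs n hbs; simpa using hbs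
  | cons i L ih =>
    intro bs n hbs
    simp only [List.foldl_cons]
    have hi := hL i (by simp)
    have hL' : ∀ x ∈ L, 0 ≤ x ∧ x ≤ 9 := fun x hx => hL x (by simp [hx])
    by_cases h : PySem.List.pyGetD pvFactsB i 0 ≤ n
    · have e1 : pvStepB (bs, n) i
          = (bs ++ [List.replicate (PySem.Int.floordiv n (PySem.List.pyGetD pvFactsB i 0)).toNat i],
             PySem.Int.mod n (PySem.List.pyGetD pvFactsB i 0)) := by
        simp [pvStepB, h]
      rw [e1]
      refine ih hL' _ _ ?_
      intro b hb d hd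
      rcases List.mem_append.mp hb with hb | hb
      · exact hbs b hb d hd
      · simp only [List.mem_singleton] at hb
        subst hb
        have := List.eq_of_mem_replicate hd
        omega
    · have e1 : pvStepB (bs, n) i = (bs, n) := by simp [pvStepB, h]
      rw [e1]; exact ih hL' _ _ hbs

lemma pvFacts_eq : pvFactsB = pvFactsA := rfl

lemma pvFpos : ∀ j ∈ PySem.List.pyRange 9 (-1) (-1), (1:Int) ≤ PySem.List.pyGetD pvFactsA j 0 := by
  decide

lemma pvFmono (a b : Int) (ha : 0 ≤ a) (hab : a ≤ b) (hb : b ≤ 9) :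
    PySem.List.pyGetD pvFactsA a 0 ≤ PySem.List.pyGetD pvFactsA b 0 := by
  have h9a : a ≤ 9 := le_trans hab hb
  interval_cases a <;> interval_cases b <;> decide

lemma pvFind_desc (j n : Int) (h0 : 0 ≤ j) (h9 : j ≤ 9)
    (hlo : PySem.List.pyGetD pvFactsA j 0 ≤ n)
    (hhi : ∀ k : Int, j < k → k ≤ 9 → n < PySem.List.pyGetD pvFactsA k 0) :
    (PySem.List.pyRange 9 (-1) (-1)).find?
      (fun i => decide (PySem.List.pyGetD pvFactsA i 0 ≤ n)) = some j := by
  have hrev : PySem.List.pyRange 9 (-1) (-1) = (PySem.List.pyRange 0 10 1).reverse := by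
    rw [PySem.List.pyRange_neg_one_eq_reverse]; norm_num
  have hsplit : PySem.List.pyRange 0 10 1
      = PySem.List.pyRange 0 (j+1) 1 ++ PySem.List.pyRange (j+1) 10 1 :=
    PySem.List.pyRange_one_append 0 (j+1) 10 (by omega) (by omega)
  have hsucc : PySem.List.pyRange 0 (j+1) 1 = PySem.List.pyRange 0 j 1 ++ [j] :=
    PySem.List.pyRange_one_succ_right h0
  rw [hrev, hsplit, hsucc, List.reverse_append, List.find?_append]
  have h1 : (PySem.List.pyRange (j+1) 10 1).reverse.find?
      (fun i => decide (PySem.List.pyGetD pvFactsA i 0 ≤ n)) = none := by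
    rw [List.find?_eq_none]
    intro x hx
    rw [List.mem_reverse, PySem.List.mem_pyRange_one] at hx
    simp only [decide_eq_true_eq]
    have := hhi x (by omega) (by omega)
    omega
  rw [h1, List.reverse_append]
  simp [decide_eq_true hlo]

lemma pvMain : ∀ (m : Nat) (j : Int), j.toNat = m → 0 ≤ j → j ≤ 9 →
    ∀ (fuel : Nat) (n : Int), j.toNat + 2 ≤ fuel → 0 ≤ n →
    (∀ k : Int, j < k → k ≤ 9 → n < PySem.List.pyGetD pvFactsA k 0) →
    pvHelperA fuel n
      = some ((((PySem.List.pyRange j (-1) (-1)).foldl pvStepB ([], n)).1).reverse.flatten) := by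
  intro m
  induction m with
  | zero =>
    intro j hj h0 h9 fuel n hfuel hn hhi
    have hj0 : j = 0 := by omega
    subst hj0
    obtain ⟨f', rfl⟩ : ∃ f', fuel = f' + 1 := ⟨fuel - 1, by omega⟩
    rw [PySem.List.pyRange_neg_one_cons (show (-1:Int) < 0 by norm_num)]
    simp only [List.foldl_cons]
    rw [show (0:Int) - 1 = -1 by norm_num, PySem.List.pyRange_neg_one_eq_nil (le_refl _)]
    simp only [List.foldl_nil]
    have hf1 : PySem.List.pyGetD pvFactsA 0 0 = 1 := by decide
    by_cases hc : PySem.List.pyGetD pvFactsB 0 0 ≤ n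
    · have hn0 : n ≠ 0 := by rw [pvFacts_eq, hf1] at hc; omega
      have e2 : pvStepB ([], n) 0
          = ([List.replicate (PySem.Int.floordiv n (PySem.List.pyGetD pvFactsB 0 0)).toNat 0],
             PySem.Int.mod n (PySem.List.pyGetD pvFactsB 0 0)) := by
        simp [pvStepB, hc]
      rw [e2]
      simp only [pvHelperA, if_neg hn0]
      rw [pvFind_desc 0 n (le_refl _) (by norm_num) (by rw [← pvFacts_eq]; exact hc) hhi]
      dsimp only
      have hrem : PySem.Int.mod n (PySem.List.pyGetD pvFactsA 0 0) = 0 := by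
        have h1 := PySem.Int.mod_nonneg n (b := PySem.List.pyGetD pvFactsA 0 0) (by omega)
        have h2 := PySem.Int.mod_lt n (b := PySem.List.pyGetD pvFactsA 0 0) (by omega)
        omega
      rw [hrem]
      obtain ⟨f'', rfl⟩ : ∃ f'', f' = f'' + 1 := ⟨f' - 1, by omega⟩
      simp [pvHelperA, pvFacts_eq]
    · have e2 : pvStepB ([], n) 0 = ([], n) := by simp [pvStepB, hc]
      rw [e2]
      have hn0 : n = 0 := by rw [pvFacts_eq, hf1] at hc; omega
      subst hn0
      simp [pvHelperA]
  | succ m ih =>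
    intro j hj h0 h9 fuel n hfuel hn hhi
    have hj1 : 1 ≤ j := by omega
    rw [PySem.List.pyRange_neg_one_cons (show (-1:Int) < j by omega)]
    simp only [List.foldl_cons]
    have hmem : j ∈ PySem.List.pyRange 9 (-1) (-1) :=
      (PySem.List.mem_pyRange_neg_one).mpr ⟨by omega, h9⟩
    have hfpos : (1:Int) ≤ PySem.List.pyGetD pvFactsA j 0 := pvFpos j hmem
    by_cases hc : PySem.List.pyGetD pvFactsB j 0 ≤ n
    · have hcA : PySem.List.pyGetD pvFactsA j 0 ≤ n := by rw [← pvFacts_eq]; exact hc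
      have hn0 : n ≠ 0 := by omega
      have e2 : pvStepB ([], n) j
          = ([List.replicate (PySem.Int.floordiv n (PySem.List.pyGetD pvFactsB j 0)).toNat j],
             PySem.Int.mod n (PySem.List.pyGetD pvFactsB j 0)) := by
        simp [pvStepB, hc]
      rw [e2, pvFoldB_acc]
      obtain ⟨f', rfl⟩ : ∃ f', fuel = f' + 1 := ⟨fuel - 1, by omega⟩
      simp only [pvHelperA, if_neg hn0]
      rw [pvFind_desc j n h0 h9 hcA hhi]
      dsimp only
      have hrnn := PySem.Int.mod_nonneg n (b := PySem.List.pyGetD pvFactsA j 0) (by omega)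
      have hrlt := PySem.Int.mod_lt n (b := PySem.List.pyGetD pvFactsA j 0) (by omega)
      have hIH := ih (j-1) (by omega) (by omega) (by omega) f'
        (PySem.Int.mod n (PySem.List.pyGetD pvFactsA j 0)) (by omega) hrnn
        (by
          intro k hk1 hk9
          have hjk : j ≤ k := by omega
          have := pvFmono j k h0 hjk hk9
          omega)
      rw [pvFacts_eq, hIH]
      simp [List.flatten_append]
    · have e2 : pvStepB ([], n) j = ([], n) := by simp [pvStepB, hc]
      rw [e2]
      have hcA : n < PySem.List.pyGetD pvFactsA j 0 := by rw [pvFacts_eq] at hc; omega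
      exact ih (j-1) (by omega) (by omega) (by omega) fuel n (by omega) hn
        (by
          intro k hk1 hk9
          by_cases hkj : k = j
          · subst hkj; exact hcA
          · exact hhi k (by omega) hk9)

lemma pvSwapLoop (orig : List String) : ∀ (m : Nat), m ≤ orig.length →
    (PySem.List.pyRange 1 (m : Int) 1).foldl pvSwapStepA orig
      = (PySem.List.enumerate orig 0).map
          (fun ks => if 1 ≤ ks.1 ∧ ks.1 < (m : Int) ∧ ks.2 = "1" then "0" else ks.2) := by
  intro m
  induction m with
  | zero =>
    intro _
    rw [PySem.List.pyRange_one_eq_nil (by norm_num)]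
    simp only [List.foldl_nil]
    have hcongr : ∀ ks ∈ PySem.List.enumerate orig 0,
        (if 1 ≤ ks.1 ∧ ks.1 < ((0:Nat) : Int) ∧ ks.2 = "1" then "0" else ks.2) = ks.2 := by
      intro ks hks
      rw [PySem.List.mem_enumerate_iff] at hks
      obtain ⟨k, hk, rfl⟩ := hks
      exact if_neg (fun h => by have := h.2.1; omega)
    rw [List.map_congr_left hcongr, PySem.List.map_snd_enumerate]
  | succ m ih =>
    intro hm1
    by_cases hm0 : m = 0
    · subst hm0
      rw [show (((0:Nat)+1 : Nat) : Int) = 1 by norm_num, PySem.List.pyRange_one_eq_nil (le_refl _)]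
      simp only [List.foldl_nil]
      have hcongr : ∀ ks ∈ PySem.List.enumerate orig 0,
          (if 1 ≤ ks.1 ∧ ks.1 < (1 : Int) ∧ ks.2 = "1" then "0" else ks.2) = ks.2 := by
        intro ks hks
        rw [PySem.List.mem_enumerate_iff] at hks
        obtain ⟨k, hk, rfl⟩ := hks
        exact if_neg (fun h => by have := h.1; have := h.2.1; omega)
      rw [List.map_congr_left hcongr, PySem.List.map_snd_enumerate]
    · have hm : m ≤ orig.length := by omega
      have hcast : (((m+1 : Nat)) : Int) = (m : Int) + 1 := by push_cast; ring
      rw [hcast, PySem.List.pyRange_one_succ_right (by exact_mod_cast Nat.one_le_iff_ne_zero.mpr hm0),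
        List.foldl_append, ih hm]
      set prev := (PySem.List.enumerate orig 0).map
          (fun ks => if 1 ≤ ks.1 ∧ ks.1 < (m : Int) ∧ ks.2 = "1" then "0" else ks.2) with hprev
      have hlen : prev.length = orig.length := by
        simp [hprev, PySem.List.length_enumerate]
      have hmlt : m < prev.length := by omega
      have hgetm : prev[m] = orig[m]'(by omega) := by
        simp only [hprev, List.getElem_map, PySem.List.getElem_enumerate]
        exact if_neg (fun h => by have := h.2.1; omega)
      simp only [List.foldl_cons, List.foldl_nil]
      have hget : PySem.List.pyGetD prev (m : Int) "" = orig[m]'(by omega) := by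
        rw [PySem.List.pyGetD_natCast, List.getD_eq_getElem _ _ hmlt, hgetm]
      unfold pvSwapStepA
      rw [hget]
      by_cases h1 : orig[m]'(by omega) = "1"
      · rw [if_pos h1, PySem.List.pySetD_natCast]
        apply List.ext_getElem
        · simp [hlen, PySem.List.length_enumerate]
        · intro k hk1 hk2
          have hko : k < orig.length := by rw [List.length_set] at hk1; omega
          rw [List.getElem_set]
          simp only [List.getElem_map, PySem.List.getElem_enumerate, hprev]
          rcases eq_or_ne m k with rfl | hkm
          · rw [if_pos rfl, if_pos ⟨by omega, by omega, h1⟩]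
          · have hkm' : (k : Int) ≠ (m : Int) := fun he => hkm (by exact_mod_cast he.symm)
            rw [if_neg hkm]
            by_cases hc : 1 ≤ ((0:Int) + k) ∧ ((0:Int) + k) < (m : Int) ∧ orig[k] = "1"
            · rw [if_pos hc, if_pos ⟨hc.1, by omega, hc.2.2⟩]
            · rw [if_neg hc, if_neg (fun h => hc ⟨h.1, by have := h.2.1; omega, h.2.2⟩)]
      · rw [if_neg h1]
        apply List.ext_getElem
        · simp [hlen, PySem.List.length_enumerate]
        · intro k hk1 hk2
          have hko : k < orig.length := by omega
          simp only [List.getElem_map, PySem.List.getElem_enumerate, hprev]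
          rcases eq_or_ne m k with rfl | hkm
          · rw [if_neg (fun h => by have := h.2.1; omega),
              if_neg (fun h => h1 h.2.2)]
          · have hkm' : (k : Int) ≠ (m : Int) := fun he => hkm (by exact_mod_cast he.symm)
            by_cases hc : 1 ≤ ((0:Int) + k) ∧ ((0:Int) + k) < (m : Int) ∧ orig[k] = "1"
            · rw [if_pos hc, if_pos ⟨hc.1, by omega, hc.2.2⟩]
            · rw [if_neg hc, if_neg (fun h => hc ⟨h.1, by have := h.2.1; omega, h.2.2⟩)]

lemma pvToStr_one_iff (d : Int) (h0 : 0 ≤ d) (h9 : d ≤ 9) :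
    PySem.Int.toStr d = "1" ↔ d = 1 := by
  interval_cases d <;> decide

lemma pvLists_eq (l : List Int) (hb : ∀ d ∈ l, 0 ≤ d ∧ d ≤ 9) :
    (PySem.List.enumerate (l.map (fun x => PySem.Int.toStr x)) 0).map
        (fun ks => if 1 ≤ ks.1 ∧ ks.1 < (l.length : Int) ∧ ks.2 = "1" then "0" else ks.2)
      = (PySem.List.enumerate l 0).map
          (fun kd => if 0 < kd.1 ∧ kd.2 = 1 then "0" else PySem.Int.toStr kd.2) := by
  apply List.ext_getElem
  · simp [PySem.List.length_enumerate]
  · intro k hk1 hk2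
    simp only [PySem.List.length_enumerate, List.length_map] at hk1 hk2
    have hkl : k < l.length := by simpa using hk2
    simp only [List.getElem_map, PySem.List.getElem_enumerate]
    have hbk := hb (l[k]'hkl) (List.getElem_mem _)
    have hiff := pvToStr_one_iff (l[k]'hkl) hbk.1 hbk.2
    by_cases hk0 : 1 ≤ ((0:Int) + k)
    · by_cases hone : l[k]'hkl = 1
      · rw [if_pos ⟨hk0, by omega, hiff.mpr hone⟩, if_pos ⟨by omega, hone⟩]
      · rw [if_neg (fun h => hone (hiff.mp h.2.2)), if_neg (fun h => hone h.2)]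
    · rw [if_neg (fun h => hk0 h.1), if_neg (fun h => by have := h.1; omega)]

lemma pvEq : ∀ (N : Int), 0 ≤ N → FactDigit N = FactDigit_alt N := by
  intro N hpre
  simp only [FactDigit, FactDigit_alt]
  have hmain := pvMain 9 9 (by decide) (by norm_num) (by norm_num) 11 N (by decide) hpre
    (fun k hk1 hk9 => absurd hk1 (by omega))
  rw [hmain, Option.getD_some]
  have hflat : (((PySem.List.pyRange 9 (-1) (-1)).foldl pvStepB ([], N)).1).reverse.foldl
      (fun acc b => acc ++ b) []
      = (((PySem.List.pyRange 9 (-1) (-1)).foldl pvStepB ([], N)).1).reverse.flatten := by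
    rw [PySem.List.foldl_append_eq_flatten, List.nil_append]
  rw [hflat]
  set digits := (((PySem.List.pyRange 9 (-1) (-1)).foldl pvStepB ([], N)).1).reverse.flatten with hdig
  have hbd : ∀ d ∈ digits, 0 ≤ d ∧ d ≤ 9 := by
    intro d hd
    rw [hdig, List.mem_flatten] at hd
    obtain ⟨b, hb, hdb⟩ := hd
    rw [List.mem_reverse] at hb
    exact pvFoldB_bound (PySem.List.pyRange 9 (-1) (-1)) (by decide) [] N (by simp) b hb d hdb
  rw [pvSwapLoop (digits.map (fun x => PySem.Int.toStr x)) _ (le_refl _)]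
  rw [show (digits.map (fun x => PySem.Int.toStr x)).length = digits.length from List.length_map ..]
  rw [pvLists_eq digits hbd]

-- ===== VERDICT (by name: the statement is the Claim_ definition above) =====
theorem FactDigit_spec : Claim_equal_FactDigit := by
  intro N _ hpre
  exact pvEq N hpre
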